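-- pv_equiv track=rewrite | github.com/Dom110/KI_AutoAgent | langgraph_system/workflow_self_diagnosis.py | _detect_collaboration_spiral
-- ===== SOURCE A (Python) =====
-- from typing import Dict, List, Any, Tuple, Optional, Set
--
-- def _detect_collaboration_spiral(history: List[Dict]) -> bool:
--     """Detect Reviewer-Fixer spiral pattern"""
--     if len(history) < 4:
--         return False
--
--     # Check for alternating pattern
--     last_4 = history[-4:]
--     pattern1 = ["reviewer", "fixer", "reviewer", "fixer"]
--     pattern2 = ["fixer", "reviewer", "fixer", "reviewer"]
--
--     actual = [h.get("to") for h in last_4]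
--     return actual == pattern1 or actual == pattern2
-- ===== SOURCE B (Python) =====
-- def _detect_collaboration_spiral(history):
--     """Detect Reviewer-Fixer spiral pattern"""
--     if len(history) < 4:
--         return False
--     actual = [h.get("to") for h in history[-4:]]
--     return set(actual) == {"reviewer", "fixer"} and all(
--         actual[i] != actual[i + 1] for i in range(3)
--     )
-- ===== Notes on version B (the rewrite author's own statement) =====
-- stated objective: alternative
-- what changed: Instead of comparing the last-4 'to' values against two precomputed template lists, B verifies the alternating property locally (adjacent pairs differ) together with the value set being exactly {reviewer, fixer}.
import Mathlib
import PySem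

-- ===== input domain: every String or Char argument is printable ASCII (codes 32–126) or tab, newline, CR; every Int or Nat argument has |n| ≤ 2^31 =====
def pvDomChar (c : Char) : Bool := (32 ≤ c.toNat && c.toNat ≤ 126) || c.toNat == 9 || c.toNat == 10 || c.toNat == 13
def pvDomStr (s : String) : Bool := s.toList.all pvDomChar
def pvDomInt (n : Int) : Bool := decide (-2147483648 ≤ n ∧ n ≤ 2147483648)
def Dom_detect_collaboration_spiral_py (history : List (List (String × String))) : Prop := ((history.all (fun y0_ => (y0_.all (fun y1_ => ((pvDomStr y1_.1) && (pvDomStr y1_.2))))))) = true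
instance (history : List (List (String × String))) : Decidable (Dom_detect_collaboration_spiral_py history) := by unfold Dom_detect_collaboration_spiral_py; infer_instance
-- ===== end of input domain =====

-- B replaces A's comparison with the two template lists by a local check:
-- the set of the last-4 'to' values is exactly {reviewer, fixer} and adjacent values differ.

-- ===== PORT A =====
def detect_collaboration_spiral_py (history : List (List (String × String))) : Bool :=
  if history.length < 4 then false
  else
    let last_4 := PySem.List.slice history (some (-4)) none
    let pattern1 : List (Option String) := [some "reviewer", some "fixer", some "reviewer", some "fixer"]
    let pattern2 : List (Option String) := [some "fixer", some "reviewer", some "fixer", some "reviewer"]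
    let actual := last_4.map (fun h => PySem.Dict.get? (PySem.Dict.mk h) "to")
    (actual == pattern1) || (actual == pattern2)

-- ===== PORT B =====
def detect_collaboration_spiral_py_alt (history : List (List (String × String))) : Bool :=
  if history.length < 4 then false
  else
    let actual := (PySem.List.slice history (some (-4)) none).map (fun h => PySem.Dict.get? (PySem.Dict.mk h) "to")
    PySem.Set.equal (PySem.Set.ofList actual)
        (PySem.Set.ofList [some "reviewer", some "fixer"]) &&
      (PySem.List.pyRange 0 3).all
        (fun i => !(PySem.List.pyGet? actual i == PySem.List.pyGet? actual (i + 1)))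

-- ===== PRECONDITION & SPEC =====
def Spec_detect_collaboration_spiral_py (history : List (List (String × String))) (out : Bool) : Prop := out = detect_collaboration_spiral_py_alt history
instance (history : List (List (String × String))) (out : Bool) : Decidable (Spec_detect_collaboration_spiral_py history out) := by unfold Spec_detect_collaboration_spiral_py; infer_instance

-- ===== CLAIM (what is proved, stated in full; the proofs are below) =====
def Claim_equal_detect_collaboration_spiral_py : Prop := ∀ (history : List (List (String × String))), Dom_detect_collaboration_spiral_py history → Spec_detect_collaboration_spiral_py history (detect_collaboration_spiral_py history)

-- ===== LEMMAS AND PROOFS =====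

theorem pv_len4 {α : Type} (l : List α) (h : l.length = 4) :
    ∃ a b c d, l = [a, b, c, d] := by
  match l, h with
  | [a, b, c, d], _ => exact ⟨a, b, c, d, rfl⟩

-- the core: template match = set-equality + pairwise alternation, for any 4 values
theorem pv_key (a b c d : Option String) :
    (([a, b, c, d] == [some "reviewer", some "fixer", some "reviewer", some "fixer"]) ||
     ([a, b, c, d] == [some "fixer", some "reviewer", some "fixer", some "reviewer"]))
    = (PySem.Set.equal (PySem.Set.ofList [a, b, c, d])
         (PySem.Set.ofList [some "reviewer", some "fixer"]) &&
       (PySem.List.pyRange 0 3).all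
         (fun i => !(PySem.List.pyGet? [a, b, c, d] i == PySem.List.pyGet? [a, b, c, d] (i + 1)))) := by
  have hr : PySem.List.pyRange 0 3 = [0, 1, 2] := by decide
  rw [Bool.eq_iff_iff]
  simp [hr, PySem.Set.equal, PySem.Set.issubset, PySem.Set.contains, List.all_eq_true,
    PySem.Set.mem_ofList, PySem.List.pyGet?, PySem.List.pyIdx?]
  constructor
  · rintro (⟨rfl, rfl, rfl, rfl⟩ | ⟨rfl, rfl, rfl, rfl⟩) <;> simp
  · rintro ⟨⟨⟨ha | ha, hb | hb, hc | hc, hd | hd⟩, _⟩, _⟩ <;> subst_vars <;> simp_all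

theorem detect_collaboration_spiral_py_eq (history : List (List (String × String))) :
    detect_collaboration_spiral_py history = detect_collaboration_spiral_py_alt history := by
  unfold detect_collaboration_spiral_py detect_collaboration_spiral_py_alt
  by_cases h : history.length < 4
  · simp [h]
  · simp only [h]
    have h4 : (PySem.List.slice history (some (-4)) none).length = 4 := by
      rw [PySem.List.slice_from_neg_ofNat history 4 (by omega)]
      simp; omega
    obtain ⟨x, y, z, w, hx⟩ := pv_len4 _ (by simpa using
      (congrArg List.length (rfl : (PySem.List.slice history (some (-4)) none).map (fun h => PySem.Dict.get? (PySem.Dict.mk h) "to") = _)) ▸ (by simp [h4] : ((PySem.List.slice history (some (-4)) none).map (fun h => PySem.Dict.get? (PySem.Dict.mk h) "to")).length = 4))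
    rw [hx]
    exact pv_key x y z w

-- ===== VERDICT (by name: the statement is the Claim_ definition above) =====
theorem detect_collaboration_spiral_py_spec : Claim_equal_detect_collaboration_spiral_py := by
  intro history _
  unfold Spec_detect_collaboration_spiral_py
  exact detect_collaboration_spiral_py_eq history
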